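-- pv_equiv track=rewrite | github.com/KavinAgrawal/Google-Foobar-Challenge | Level 3/find_the_access_codes/find_the_access_codes.py | solution
-- ===== SOURCE A (Python) =====
-- def solution(l):
--     arr = []
--     count = []
--     for i in range(len(l)):
--         c = 0
--         a = []
--         for j in range(i+1,len(l)):
--             if(l[j]%l[i] == 0):
--                 c += 1
--                 a.append(j)
--         arr.append(a)
--         count.append(c)
--
--     val = 0
--     for i in range(len(l)):
--         for j in arr[i]:
--             val += len(arr[j])
--     return val
-- ===== SOURCE B (Python) =====
-- def solution(l):
--     n = len(l)
--     total = 0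
--     for j in range(n):
--         d = 0
--         for i in range(j):
--             if l[j] % l[i] == 0:
--                 d += 1
--         u = 0
--         for k in range(j + 1, n):
--             if l[k] % l[j] == 0:
--                 u += 1
--         total += d * u
--     return total
-- ===== Notes on version B (the rewrite author's own statement) =====
-- stated objective: simpler
-- what changed: B recounts the triples around each middle element j, keeping only two integer counts (left divisors d and right multiples u) and summing d*u, instead of A's two-phase construction of per-index adjacency lists that are then re-traversed.
import Mathlib
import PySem

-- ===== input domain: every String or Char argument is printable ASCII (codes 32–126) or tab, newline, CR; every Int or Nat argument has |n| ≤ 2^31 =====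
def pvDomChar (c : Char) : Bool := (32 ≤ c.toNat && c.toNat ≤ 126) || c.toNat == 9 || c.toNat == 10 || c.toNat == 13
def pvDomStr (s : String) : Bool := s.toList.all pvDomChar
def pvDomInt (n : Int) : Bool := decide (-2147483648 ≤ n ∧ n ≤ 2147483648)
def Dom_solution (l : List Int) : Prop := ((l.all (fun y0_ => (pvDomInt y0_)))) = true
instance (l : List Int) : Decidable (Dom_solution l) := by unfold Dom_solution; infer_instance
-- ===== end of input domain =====

-- B counts each lucky triple around its middle element, keeping only two integer
-- counts per middle index instead of A's per-index adjacency lists (objective: simpler).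

-- ===== PORT A =====
def solution (l : List Int) : Int :=
  let n := PySem.List.len l
  let st :=
    (PySem.List.pyRange 0 n).foldl
      (fun (st : List (List Int) × List Int) i =>
        let ca :=
          (PySem.List.pyRange (i + 1) n).foldl
            (fun (ca : Int × List Int) j =>
              if PySem.Int.mod (PySem.List.pyGetD l j 0) (PySem.List.pyGetD l i 0) = 0
              then (ca.1 + 1, ca.2 ++ [j]) else ca)
            (0, [])
        (st.1 ++ [ca.2], st.2 ++ [ca.1]))
      ([], [])
  (PySem.List.pyRange 0 n).foldl
    (fun val i =>
      (PySem.List.pyGetD st.1 i []).foldl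
        (fun val j => val + ((PySem.List.pyGetD st.1 j []).length : Int)) val)
    0

-- ===== PORT B =====
def solution_alt (l : List Int) : Int :=
  let n := PySem.List.len l
  (PySem.List.pyRange 0 n).foldl
    (fun total j =>
      let d :=
        (PySem.List.pyRange 0 j).foldl
          (fun d i =>
            if PySem.Int.mod (PySem.List.pyGetD l j 0) (PySem.List.pyGetD l i 0) = 0
            then d + 1 else d) 0
      let u :=
        (PySem.List.pyRange (j + 1) n).foldl
          (fun u k =>
            if PySem.Int.mod (PySem.List.pyGetD l k 0) (PySem.List.pyGetD l j 0) = 0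
            then u + 1 else u) 0
      total + d * u)
    0

-- ===== PRECONDITION & SPEC =====
-- Pre_ excludes lists with a 0 anywhere before the last position: there the Python A
-- (and the Python B alike) raises ZeroDivisionError on a '% l[i]' with l[i] == 0.
def Pre_solution (l : List Int) : Prop := ∀ x ∈ l.dropLast, x ≠ 0
instance (l : List Int) : Decidable (Pre_solution l) := by unfold Pre_solution; infer_instance
def pvWitness_solution : List Int := [1, 2, 4, 8]
def Spec_solution (l : List Int) (out : Int) : Prop := out = solution_alt l
instance (l : List Int) (out : Int) : Decidable (Spec_solution l out) := by unfold Spec_solution; infer_instance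

-- ===== CLAIM (what is proved, stated in full; the proofs are below) =====
def Claim_equal_solution : Prop := ∀ (l : List Int), Dom_solution l → Pre_solution l → Spec_solution l (solution l)

-- ===== LEMMAS AND PROOFS =====

-- the divisibility test l[j] % l[i] == 0 (nat indices; used in-range only)
def pcond (l : List Int) (i j : ℕ) : Bool := decide (PySem.Int.mod (l.getD j 0) (l.getD i 0) = 0)
-- number of left partners of middle j, and of right partners of j below n
def dcnt (l : List Int) (j : ℕ) : ℕ := List.countP (fun i => pcond l i j) (List.range j)
def ucnt (l : List Int) (n j : ℕ) : ℕ :=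
  List.countP (fun k => pcond l j k) (List.range' (j + 1) (n - (j + 1)))
-- A's arr[i]
def alist (l : List Int) (n i : ℕ) : List Int :=
  ((List.range' (i + 1) (n - (i + 1))).filter (fun j => pcond l i j)).map (fun j : ℕ => (j : Int))

lemma pyRange_cast (a b : ℕ) :
    PySem.List.pyRange (a : Int) (b : Int) = (List.range' a (b - a)).map (fun k : ℕ => (k : Int)) := by
  rcases Nat.lt_or_ge a b with h | h
  case inl =>
    obtain ⟨k, hk⟩ : ∃ k, b - a = k + 1 := ⟨b - a - 1, by omega⟩
    rw [hk]
    rw [PySem.List.pyRange_one_cons (by exact_mod_cast h)]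
    have e1 : ((a : Int) + 1) = ((a + 1 : ℕ) : Int) := by push_cast; ring
    rw [e1, pyRange_cast (a+1) b]
    have e2 : b - (a + 1) = k := by omega
    rw [e2, List.range'_succ]
    simp
  case inr =>
    have h0 : b - a = 0 := by omega
    rw [h0]
    apply List.eq_nil_iff_forall_not_mem.mpr
    intro x hx
    have := (PySem.List.mem_pyRange_one).mp hx
    omega
termination_by b - a
decreasing_by omega

lemma sum_filter_map (p : ℕ → Bool) (f : ℕ → ℤ) (L : List ℕ) :
    ((L.filter p).map f).sum = (L.map (fun x => if p x then f x else 0)).sum := by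
  induction L with
  | nil => rfl
  | cons x t ih => by_cases h : p x <;> simp [h, ih]

lemma sum_map_range (F : ℕ → ℤ) (n : ℕ) :
    ((List.range n).map F).sum = ∑ i ∈ Finset.range n, F i := rfl

lemma sum_map_range' (F : ℕ → ℤ) (a b : ℕ) :
    ((List.range' a b).map F).sum = ∑ j ∈ Finset.Ico a (a + b), F j := by
  rw [List.range'_eq_map_range, List.map_map, Finset.sum_Ico_eq_sum_range]
  simp only [Nat.add_sub_cancel_left]
  rw [← sum_map_range]
  rfl

lemma B_char (l : List Int) :
    solution_alt l = ∑ j ∈ Finset.range l.length, (dcnt l j : ℤ) * (ucnt l l.length j : ℤ) := by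
  have hlen : PySem.List.len l = (l.length : Int) := by simp [PySem.List.len]
  simp only [solution_alt, hlen]
  have hcong : ∀ j ∈ List.range l.length, ∀ total : ℤ,
      (total +
        (PySem.List.pyRange 0 (j : Int)).foldl
          (fun d i =>
            if PySem.Int.mod (PySem.List.pyGetD l (j : Int) 0) (PySem.List.pyGetD l i 0) = 0
            then d + 1 else d) 0 *
        (PySem.List.pyRange ((j : Int) + 1) (l.length : Int)).foldl
          (fun u k =>
            if PySem.Int.mod (PySem.List.pyGetD l k 0) (PySem.List.pyGetD l (j : Int) 0) = 0
            then u + 1 else u) 0)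
      = total + (dcnt l j : ℤ) * (ucnt l l.length j : ℤ) := by
    intro j hj total
    congr 1
    have hd : (PySem.List.pyRange 0 (j : Int)).foldl
        (fun d i =>
          if PySem.Int.mod (PySem.List.pyGetD l (j : Int) 0) (PySem.List.pyGetD l i 0) = 0
          then d + 1 else d) 0 = (dcnt l j : ℤ) := by
      rw [PySem.List.pyRange_zero_natCast, List.foldl_map]
      rw [PySem.List.foldl_ite_add_one (p := fun i : ℕ =>
        PySem.Int.mod (PySem.List.pyGetD l (j : Int) 0) (PySem.List.pyGetD l (i : Int) 0) = 0)]
      simp [dcnt, pcond, PySem.List.pyGetD_natCast]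
    have hu : (PySem.List.pyRange ((j : Int) + 1) (l.length : Int)).foldl
        (fun u k =>
          if PySem.Int.mod (PySem.List.pyGetD l k 0) (PySem.List.pyGetD l (j : Int) 0) = 0
          then u + 1 else u) 0 = (ucnt l l.length j : ℤ) := by
      have e1 : ((j : Int) + 1) = ((j + 1 : ℕ) : Int) := by push_cast; ring
      rw [e1, pyRange_cast, List.foldl_map]
      rw [PySem.List.foldl_ite_add_one (p := fun k : ℕ =>
        PySem.Int.mod (PySem.List.pyGetD l (k : Int) 0) (PySem.List.pyGetD l (j : Int) 0) = 0)]
      simp [ucnt, pcond, PySem.List.pyGetD_natCast]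
    rw [hd, hu]
  rw [PySem.List.pyRange_zero_natCast, List.foldl_map]
  refine Eq.trans (PySem.List.foldl_congr_mem' _ _ _ _ hcong) ?_
  rw [PySem.List.foldl_add (g := fun j : ℕ => (dcnt l j : ℤ) * (ucnt l l.length j : ℤ)),
    sum_map_range, zero_add]

lemma inner_pair (l : List Int) (n i : ℕ) :
    (PySem.List.pyRange ((i : Int) + 1) (n : Int)).foldl
      (fun (ca : Int × List Int) j =>
        if PySem.Int.mod (PySem.List.pyGetD l j 0) (PySem.List.pyGetD l (i : Int) 0) = 0
        then (ca.1 + 1, ca.2 ++ [j]) else ca)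
      (0, []) = ((ucnt l n i : Int), alist l n i) := by
  have e1 : ((i : Int) + 1) = ((i + 1 : ℕ) : Int) := by push_cast; ring
  rw [e1, pyRange_cast, List.foldl_map]
  have hfun : (fun (ca : Int × List Int) (j : ℕ) =>
      if PySem.Int.mod (PySem.List.pyGetD l ((j : ℕ) : Int) 0) (PySem.List.pyGetD l (i : Int) 0) = 0
      then (ca.1 + 1, ca.2 ++ [((j : ℕ) : Int)]) else ca)
      = fun ca j =>
        ((if PySem.Int.mod (PySem.List.pyGetD l ((j : ℕ) : Int) 0) (PySem.List.pyGetD l (i : Int) 0) = 0 then ca.1 + 1 else ca.1),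
         (if PySem.Int.mod (PySem.List.pyGetD l ((j : ℕ) : Int) 0) (PySem.List.pyGetD l (i : Int) 0) = 0 then ca.2 ++ [((j : ℕ) : Int)] else ca.2)) := by
    funext ca j
    split_ifs <;> rfl
  rw [hfun]
  rw [PySem.List.foldl_prod_mk
    (f := fun (c : Int) (j : ℕ) => if PySem.Int.mod (PySem.List.pyGetD l (j : Int) 0) (PySem.List.pyGetD l (i : Int) 0) = 0 then c + 1 else c)
    (g := fun (a : List Int) (j : ℕ) => if PySem.Int.mod (PySem.List.pyGetD l (j : Int) 0) (PySem.List.pyGetD l (i : Int) 0) = 0 then a ++ [(j : Int)] else a)]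
  refine Prod.ext ?_ ?_
  · show (List.foldl _ 0 _) = _
    rw [PySem.List.foldl_ite_add_one (p := fun j : ℕ =>
      PySem.Int.mod (PySem.List.pyGetD l (j : Int) 0) (PySem.List.pyGetD l (i : Int) 0) = 0)]
    simp [ucnt, pcond, PySem.List.pyGetD_natCast]
  · show (List.foldl _ [] _) = _
    rw [PySem.List.foldl_append_ite (p := fun j : ℕ =>
      PySem.Int.mod (PySem.List.pyGetD l (j : Int) 0) (PySem.List.pyGetD l (i : Int) 0) = 0)
      (f := fun j : ℕ => (j : Int))]
    simp only [List.nil_append, alist]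
    congr 1
    apply List.filter_congr
    intro j _
    simp [pcond, PySem.List.pyGetD_natCast]

lemma st_char (l : List Int) :
    (PySem.List.pyRange 0 (l.length : Int)).foldl
      (fun (st : List (List Int) × List Int) i =>
        let ca :=
          (PySem.List.pyRange (i + 1) (l.length : Int)).foldl
            (fun (ca : Int × List Int) j =>
              if PySem.Int.mod (PySem.List.pyGetD l j 0) (PySem.List.pyGetD l i 0) = 0
              then (ca.1 + 1, ca.2 ++ [j]) else ca)
            (0, [])
        (st.1 ++ [ca.2], st.2 ++ [ca.1]))
      ([], [])
    = ((List.range l.length).map (alist l l.length),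
       (List.range l.length).map (fun i => (ucnt l l.length i : Int))) := by
  rw [PySem.List.pyRange_zero_natCast, List.foldl_map]
  have hfun : (fun (st : List (List Int) × List Int) (i : ℕ) =>
      let ca :=
        (PySem.List.pyRange ((i : Int) + 1) (l.length : Int)).foldl
          (fun (ca : Int × List Int) j =>
            if PySem.Int.mod (PySem.List.pyGetD l j 0) (PySem.List.pyGetD l (i : Int) 0) = 0
            then (ca.1 + 1, ca.2 ++ [j]) else ca)
          (0, [])
      (st.1 ++ [ca.2], st.2 ++ [ca.1]))
      = fun st i => (st.1 ++ [alist l l.length i], st.2 ++ [(ucnt l l.length i : Int)]) := by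
    funext st i
    simp only [inner_pair l l.length i]
  rw [hfun]
  rw [PySem.List.foldl_prod_mk
    (f := fun (a : List (List Int)) (i : ℕ) => a ++ [alist l l.length i])
    (g := fun (c : List Int) (i : ℕ) => c ++ [(ucnt l l.length i : Int)])]
  rw [PySem.List.foldl_append_singleton_eq_map, PySem.List.foldl_append_singleton_eq_map]
  simp

lemma alist_length (l : List Int) (n j : ℕ) : ((alist l n j).length : ℤ) = (ucnt l n j : ℤ) := by
  simp [alist, ucnt, List.countP_eq_length_filter]

lemma A_fold_char (l : List Int) :
    solution l = ∑ i ∈ Finset.range l.length,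
      (((List.range' (i + 1) (l.length - (i + 1))).filter (fun j => pcond l i j)).map
        (fun j : ℕ => (ucnt l l.length j : ℤ))).sum := by
  have hlen : PySem.List.len l = (l.length : Int) := by simp [PySem.List.len]
  simp only [solution, hlen, st_char]
  rw [PySem.List.pyRange_zero_natCast, List.foldl_map]
  have hcong : ∀ i ∈ List.range l.length, ∀ val : ℤ,
      ((PySem.List.pyGetD ((List.range l.length).map (alist l l.length)) (i : Int) []).foldl
        (fun val j => val + ((PySem.List.pyGetD ((List.range l.length).map (alist l l.length)) j []).length : Int)) val)
      = val + (((List.range' (i + 1) (l.length - (i + 1))).filter (fun j => pcond l i j)).map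
          (fun j : ℕ => (ucnt l l.length j : ℤ))).sum := by
    intro i hi val
    have hin : i < l.length := List.mem_range.mp hi
    rw [PySem.List.pyGetD_natCast, PySem.List.getD_map_range _ _ _ _ hin]
    rw [show alist l l.length i
        = ((List.range' (i + 1) (l.length - (i + 1))).filter (fun j => pcond l i j)).map (fun j : ℕ => (j : Int)) from rfl]
    rw [List.foldl_map]
    have hcong2 : ∀ j ∈ (List.range' (i + 1) (l.length - (i + 1))).filter (fun j => pcond l i j), ∀ val : ℤ,
        (val + ((PySem.List.pyGetD ((List.range l.length).map (alist l l.length)) ((j : ℕ) : Int) []).length : Int))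
        = val + (ucnt l l.length j : ℤ) := by
      intro j hj val
      have hjn : j < l.length := by
        have := List.mem_range'_1.mp (List.mem_of_mem_filter hj)
        omega
      rw [PySem.List.pyGetD_natCast, PySem.List.getD_map_range _ _ _ _ hjn, alist_length]
    refine Eq.trans (PySem.List.foldl_congr_mem' _ _ _ _ hcong2) ?_
    rw [PySem.List.foldl_add (g := fun j : ℕ => (ucnt l l.length j : ℤ))]
  refine Eq.trans (PySem.List.foldl_congr_mem' _ _ _ _ hcong) ?_
  rw [PySem.List.foldl_add, sum_map_range, zero_add]

lemma A_char (l : List Int) :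
    solution l = ∑ j ∈ Finset.range l.length, (dcnt l j : ℤ) * (ucnt l l.length j : ℤ) := by
  rw [A_fold_char]
  have step1 : ∀ i ∈ Finset.range l.length,
      (((List.range' (i + 1) (l.length - (i + 1))).filter (fun j => pcond l i j)).map
        (fun j : ℕ => (ucnt l l.length j : ℤ))).sum
      = ∑ j ∈ Finset.range l.length,
          (if i + 1 ≤ j ∧ pcond l i j = true then (ucnt l l.length j : ℤ) else 0) := by
    intro i hi
    have hi' : i < l.length := Finset.mem_range.mp hi
    rw [sum_filter_map, sum_map_range']
    rw [show (i + 1) + (l.length - (i + 1)) = l.length from by omega]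
    rw [show Finset.Ico (i + 1) l.length = (Finset.range l.length).filter (fun j => i + 1 ≤ j) from by
      ext x; simp [Finset.mem_filter, Finset.mem_range, Finset.mem_Ico]; omega]
    rw [Finset.sum_filter]
    refine Finset.sum_congr rfl ?_
    intro j _
    by_cases h1 : i + 1 ≤ j <;> by_cases h2 : pcond l i j = true <;> simp [h1, h2]
  rw [Finset.sum_congr rfl step1, Finset.sum_comm]
  refine Finset.sum_congr rfl ?_
  intro j hj
  have hj' : j < l.length := Finset.mem_range.mp hj
  have step2 : ∀ i ∈ Finset.range l.length,
      (if i + 1 ≤ j ∧ pcond l i j = true then (ucnt l l.length j : ℤ) else 0)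
      = (if i + 1 ≤ j ∧ pcond l i j = true then (1:ℤ) else 0) * (ucnt l l.length j : ℤ) := by
    intro i _
    split_ifs <;> ring
  rw [Finset.sum_congr rfl step2, ← Finset.sum_mul]
  congr 1
  rw [← Finset.sum_filter (fun i => i + 1 ≤ j ∧ pcond l i j = true) (fun _ => (1:ℤ))]
  rw [show (Finset.range l.length).filter (fun i => i + 1 ≤ j ∧ pcond l i j = true)
      = (Finset.range j).filter (fun i => pcond l i j = true) from by
    ext x; simp [Finset.mem_filter, Finset.mem_range]; intro; omega]
  rw [Finset.sum_filter]
  rw [show (∑ i ∈ Finset.range j, if pcond l i j = true then (1:ℤ) else 0)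
      = ((List.range j).map (fun i => if pcond l i j = true then (1:ℤ) else 0)).sum from rfl]
  rw [PySem.List.sum_map_ite_one_zero (fun i => pcond l i j) (List.range j)]
  rfl

-- ===== VERDICT (by name: the statement is the Claim_ definition above) =====
theorem solution_spec : Claim_equal_solution := by
  intro l _ _
  unfold Spec_solution
  rw [A_char, B_char]
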